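-- pv_equiv track=rewrite | github.com/shekharkrishna/Amazon-2020-Prep | Online Assesment/Items in Containers/1Solution.py | check
-- ===== SOURCE A (Python) =====
-- def check(s, starts, ends):
--     valid_range =[s.find('|'), s.rfind('|')]
--
--     if valid_range[0] == valid_range[1]:
--         return [0] * len(starts)
--
--     ans = []
--
--     for i in range(len(starts)):
--         counter = 0
--
--         to_search = [max(starts[i]-1,valid_range[0]),min(ends[i]-1,valid_range[1])]
--
--         for j in range(to_search[0],to_search[1]):
--             if s[j] == '*':
--                 counter+=1
--         ans.append(counter)
--
--     return ans
-- ===== SOURCE B (Python) =====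
-- def check(s, starts, ends):
--     first = s.find('|')
--     last = s.rfind('|')
--     if first == last:
--         return [0] * len(starts)
--     pref = [0]
--     c = 0
--     for ch in s:
--         c += (ch == '*')
--         pref.append(c)
--     ans = []
--     for i in range(len(starts)):
--         a = max(starts[i] - 1, first)
--         b = min(ends[i] - 1, last)
--         ans.append(pref[b] - pref[a] if a < b else 0)
--     return ans
-- ===== Notes on version B (the rewrite author's own statement) =====
-- stated objective: alternative
-- what changed: Replaced A's per-query character scan of the string by a prefix-sum array of '*' counts built once, so each query is answered by one subtraction (0 when the clamped range is empty).
import Mathlib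
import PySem

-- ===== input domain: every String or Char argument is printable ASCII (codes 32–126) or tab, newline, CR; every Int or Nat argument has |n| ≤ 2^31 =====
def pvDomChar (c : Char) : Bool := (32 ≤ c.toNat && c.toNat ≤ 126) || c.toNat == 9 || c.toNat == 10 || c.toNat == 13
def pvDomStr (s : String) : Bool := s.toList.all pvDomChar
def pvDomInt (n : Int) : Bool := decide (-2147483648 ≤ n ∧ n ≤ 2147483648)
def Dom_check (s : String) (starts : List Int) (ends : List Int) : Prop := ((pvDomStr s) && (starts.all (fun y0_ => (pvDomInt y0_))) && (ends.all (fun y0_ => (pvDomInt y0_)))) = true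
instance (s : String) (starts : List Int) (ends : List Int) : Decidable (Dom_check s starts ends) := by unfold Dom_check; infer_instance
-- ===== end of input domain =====

-- B replaces A's per-query character scan by a prefix-sum array of '*' counts built once,
-- answering each query by a single subtraction (0 when the clamped range is empty).


-- ===== PORT A =====
-- literal port of A: per query i, scan s[j] for j in range(max(starts[i]-1,find), min(ends[i]-1,rfind)).
-- ends[i] is read with pyGetD (Python raises IndexError when i ≥ len(ends); Pre_check excludes that).
def check (s : String) (starts : List Int) (ends : List Int) : List Int :=
  let vr0 : Int := PySem.Str.find s "|"
  let vr1 : Int := PySem.Str.rfind s "|"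
  if vr0 = vr1 then
    List.replicate starts.length 0
  else
    (PySem.List.pyRange 0 starts.length).foldl (fun ans i =>
      let t0 : Int := max (PySem.List.pyGetD starts i 0 - 1) vr0
      let t1 : Int := min (PySem.List.pyGetD ends i 0 - 1) vr1
      let counter : Int := (PySem.List.pyRange t0 t1).foldl
        (fun c j => if PySem.Str.pyGet? s j = some '*' then c + 1 else c) 0
      ans ++ [counter]) []

-- ===== PORT B =====
-- literal port of Source B: build pref (pref[k] = number of '*' among the first k chars),
-- then answer each query as pref[b] - pref[a] (0 if a ≥ b).
def check_alt (s : String) (starts : List Int) (ends : List Int) : List Int :=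
  let first : Int := PySem.Str.find s "|"
  let last : Int := PySem.Str.rfind s "|"
  if first = last then
    List.replicate starts.length 0
  else
    let pref : List Int := (s.toList.foldl (fun (pc : List Int × Int) ch =>
      let c : Int := pc.2 + (if ch = '*' then 1 else 0)
      (pc.1 ++ [c], c)) ([0], 0)).1
    (PySem.List.pyRange 0 starts.length).foldl (fun ans i =>
      let a : Int := max (PySem.List.pyGetD starts i 0 - 1) first
      let b : Int := min (PySem.List.pyGetD ends i 0 - 1) last
      ans ++ [if a < b then PySem.List.pyGetD pref b 0 - PySem.List.pyGetD pref a 0 else 0]) []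

-- ===== PRECONDITION & SPEC =====
-- Pre_ excludes exactly the inputs where s has at least two '|' walls (find ≠ rfind) while ends is
-- shorter than starts: there Python A raises IndexError on ends[i] (and B raises likewise); when
-- find = rfind, A returns [0]*len(starts) without reading ends, so those inputs stay inside Pre_.
def Pre_check (s : String) (starts : List Int) (ends : List Int) : Prop :=
  starts.length ≤ ends.length ∨ PySem.Str.find s "|" = PySem.Str.rfind s "|"
instance (s : String) (starts : List Int) (ends : List Int) : Decidable (Pre_check s starts ends) := by unfold Pre_check; infer_instance
def pvWitness_check : String × List Int × List Int := ("|**|", [1], [4])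
def Spec_check (s : String) (starts : List Int) (ends : List Int) (out : List Int) : Prop := out = check_alt s starts ends
instance (s : String) (starts : List Int) (ends : List Int) (out : List Int) : Decidable (Spec_check s starts ends out) := by unfold Spec_check; infer_instance

-- ===== CLAIM (what is proved, stated in full; the proofs are below) =====
def Claim_equal_check : Prop := ∀ (s : String) (starts : List Int) (ends : List Int), Dom_check s starts ends → Pre_check s starts ends → Spec_check s starts ends (check s starts ends)

-- ===== LEMMAS AND PROOFS =====

-- number of '*' in a list of chars, as an Int
def starCnt (t : List Char) : Int := (t.countP (fun ch => ch == '*') : Int)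


theorem rfind_go_zero (l sub : List Char) :
    PySem.Chars.rfind.go l sub 0 = if sub.isPrefixOf l then 0 else -1 := by
  rw [PySem.Chars.rfind.go.eq_def]

theorem rfind_go_succ (l sub : List Char) (j : Nat) :
    PySem.Chars.rfind.go l sub (j + 1) =
      if sub.isPrefixOf (l.drop (j + 1)) then ((j : Int) + 1) else PySem.Chars.rfind.go l sub j := by
  rw [PySem.Chars.rfind.go.eq_def]; push_cast; rfl

theorem rfind_go_spec (l sub : List Char) (j : Nat) :
    PySem.Chars.rfind.go l sub j = -1 ∨
      (0 ≤ PySem.Chars.rfind.go l sub j ∧ PySem.Chars.rfind.go l sub j ≤ (j : Int) ∧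
        sub <+: l.drop (PySem.Chars.rfind.go l sub j).toNat) := by
  induction j with
  | zero =>
    rw [rfind_go_zero]
    split_ifs with h
    · exact Or.inr ⟨le_refl 0, le_refl 0, by simpa using List.isPrefixOf_iff_prefix.mp h⟩
    · exact Or.inl rfl
  | succ j ih =>
    rw [rfind_go_succ]
    split_ifs with h
    · refine Or.inr ⟨by positivity, le_refl _, ?_⟩
      simpa using List.isPrefixOf_iff_prefix.mp h
    · rcases ih with h1 | ⟨h1, h2, h3⟩
      · exact Or.inl h1
      · exact Or.inr ⟨h1, le_trans h2 (by push_cast; omega), h3⟩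

theorem rfind_go_complete (l sub : List Char) (j k : Nat) (hk : k ≤ j)
    (h : sub <+: l.drop k) : 0 ≤ PySem.Chars.rfind.go l sub j := by
  induction j with
  | zero =>
    rw [rfind_go_zero]
    have hk0 : k = 0 := Nat.le_zero.mp hk
    subst hk0
    rw [if_pos (List.isPrefixOf_iff_prefix.mpr (by simpa using h))]
  | succ j ih =>
    rw [rfind_go_succ]
    split_ifs with hp
    · positivity
    · rcases Nat.lt_or_ge k (j + 1) with hlt | hge
      · exact ih (Nat.lt_succ_iff.mp hlt)
      · exfalso
        have : k = j + 1 := le_antisymm hk hge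
        subst this
        exact hp (List.isPrefixOf_iff_prefix.mpr h)

-- the bounds both ports rely on when there are at least two walls
theorem walls_bounds (l : List Char)
    (hne : PySem.Chars.find l ['|'] ≠ PySem.Chars.rfind l ['|']) :
    0 ≤ PySem.Chars.find l ['|'] ∧ 0 ≤ PySem.Chars.rfind l ['|'] ∧
      (PySem.Chars.rfind l ['|']).toNat < l.length := by
  have hrfl : PySem.Chars.rfind l ['|'] = PySem.Chars.rfind.go l ['|'] l.length := rfl
  by_cases hf : 0 ≤ PySem.Chars.find l ['|']
  · -- a wall exists: rfind finds one too
    have hinf : ['|'] <:+: l := (PySem.Chars.find_nonneg_iff l ['|']).mp hf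
    have hmem : '|' ∈ l := by
      rcases hinf with ⟨p, q, hpq⟩
      subst hpq; simp
    obtain ⟨k, hk, hkv⟩ := List.mem_iff_getElem.mp hmem
    have hpre : ['|'] <+: l.drop k := by
      rw [List.drop_eq_getElem_cons hk, hkv]
      exact ⟨l.drop (k + 1), rfl⟩
    have hr : 0 ≤ PySem.Chars.rfind l ['|'] := by
      rw [hrfl]; exact rfind_go_complete l ['|'] l.length k (le_of_lt hk) hpre
    refine ⟨hf, hr, ?_⟩
    rcases rfind_go_spec l ['|'] l.length with h1 | ⟨_, h2, h3⟩
    · rw [hrfl] at hr; omega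
    · rw [hrfl]
      rcases h3 with ⟨t, ht⟩
      have : l.drop (PySem.Chars.rfind.go l ['|'] l.length).toNat ≠ [] := by
        rw [← ht]; simp
      rw [ne_eq, List.drop_eq_nil_iff] at this
      omega
  · -- no wall: find = rfind = -1, contradicting hne
    exfalso
    have hf1 : PySem.Chars.find l ['|'] = -1 :=
      (PySem.Chars.find_eq_neg_one_iff l ['|']).mpr
        (fun h => hf ((PySem.Chars.find_nonneg_iff l ['|']).mpr h))
    have hr1 : PySem.Chars.rfind l ['|'] = -1 := by
      rcases rfind_go_spec l ['|'] l.length with h1 | ⟨h1, _, h3⟩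
      · rw [hrfl]; exact h1
      · exfalso
        apply hf
        rw [PySem.Chars.find_nonneg_iff]
        exact h3.isInfix.trans (List.drop_suffix _ _).isInfix
    rw [hf1, hr1] at hne
    exact hne rfl

-- the prefix fold of B, characterised
theorem pref_fold (t : List Char) (p : List Int) (c : Int) :
    (t.foldl (fun (pc : List Int × Int) ch =>
        (pc.1 ++ [pc.2 + (if ch = '*' then 1 else 0)], pc.2 + (if ch = '*' then 1 else 0)))
      (p, c)).1
    = p ++ (List.range t.length).map (fun k => c + starCnt (t.take (k + 1))) := by
  induction t generalizing p c with
  | nil => simp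
  | cons ch t ih =>
    rw [List.foldl_cons, ih, List.length_cons, List.range_succ_eq_map, List.map_cons,
      List.map_map, List.append_assoc, List.singleton_append]
    congr 1
    congr 1
    · simp [starCnt, List.countP_cons]
    · apply List.map_congr_left
      intro k _
      simp only [Function.comp_apply, starCnt, List.take_succ_cons, List.countP_cons]
      rcases eq_or_ne ch '*' with h | h <;> simp [h, add_assoc, add_comm (1 : Int)]

theorem pref_getD (l : List Char) (k : Nat) (hk : k ≤ l.length) :
    PySem.List.pyGetD ([0] ++ (List.range l.length).map (fun k => starCnt (l.take (k + 1)))) (k : Int) 0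
      = starCnt (l.take k) := by
  rw [PySem.List.pyGetD_natCast]
  cases k with
  | zero => simp [starCnt]
  | succ m =>
    have hm : m < l.length := by omega
    simp [List.getD, hm]

theorem pref_getD_int (l : List Char) (i : Int) (h0 : 0 ≤ i) (h : i ≤ (l.length : Int)) :
    PySem.List.pyGetD ([0] ++ (List.range l.length).map (fun k => starCnt (l.take (k + 1)))) i 0
      = starCnt (l.take i.toNat) := by
  have hpg := pref_getD l i.toNat (by omega)
  rw [show ((i.toNat : Nat) : Int) = i from by omega] at hpg
  exact hpg

-- the inner scan of A, characterised as a countP over the sliced list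
theorem scan_countP (l : List Char) (m : Nat) (a : Int) (ha : 0 ≤ a)
    (hb : a + m ≤ (l.length : Int)) :
    (PySem.List.pyRange a (a + m)).countP (fun j => decide (PySem.Chars.pyGet? l j = some '*'))
      = ((l.drop a.toNat).take m).countP (fun ch => ch == '*') := by
  induction m generalizing a with
  | zero => simp [PySem.List.pyRange_one_eq_nil (le_refl a)]
  | succ m ih =>
    have haLen : a.toNat < l.length := by omega
    rw [show (a + ((m : Nat) + 1 : Nat) : Int) = (a + 1) + (m : Nat) by push_cast; ring] at *
    rw [PySem.List.pyRange_one_cons (by omega), List.countP_cons]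
    rw [ih (a + 1) (by omega) (by omega)]
    rw [List.drop_eq_getElem_cons haLen, List.take_succ_cons, List.countP_cons]
    have hget : PySem.Chars.pyGet? l a = some l[a.toNat] :=
      PySem.List.pyGet?_eq_some_getElem l ha (by omega)
    have htoNat : (a + 1).toNat = a.toNat + 1 := by omega
    rw [hget, htoNat]
    by_cases h : l[a.toNat] = '*' <;> simp [h]

-- per-query agreement: scan of [a,b) equals the prefix-sum difference
theorem query_eq (l : List Char) (a b : Int) (ha : 0 ≤ a) (hb : b ≤ (l.length : Int)) :
    (PySem.List.pyRange a b).foldl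
        (fun c j => if PySem.Chars.pyGet? l j = some '*' then c + 1 else c) 0
      = (if a < b then
          PySem.List.pyGetD ([0] ++ (List.range l.length).map (fun k => starCnt (l.take (k + 1)))) b 0
          - PySem.List.pyGetD ([0] ++ (List.range l.length).map (fun k => starCnt (l.take (k + 1)))) a 0
        else 0) := by
  by_cases hab : a < b
  · rw [if_pos hab]
    obtain ⟨m, hbm⟩ : ∃ m : Nat, b = a + (m : Int) := ⟨(b - a).toNat, by omega⟩
    subst hbm
    rw [PySem.List.foldl_ite_add_one, scan_countP l m a ha (by omega),
      pref_getD_int l (a + (m : Int)) (by omega) (by omega), pref_getD_int l a ha (by omega)]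
    rw [show (a + (m : Int)).toNat = a.toNat + m from by omega, List.take_add]
    simp only [starCnt, List.countP_append]
    push_cast; ring
  · rw [if_neg hab, PySem.List.pyRange_one_eq_nil (by omega)]
    simp

-- ===== VERDICT (by name: the statement is the Claim_ definition above) =====
theorem check_spec : Claim_equal_check := by
  intro s starts ends _ _
  unfold Spec_check check check_alt
  by_cases hne : PySem.Str.find s "|" = PySem.Str.rfind s "|"
  · simp only [hne, if_true]
  · simp only [if_neg hne]
    have hne' : PySem.Chars.find s.toList ['|'] ≠ PySem.Chars.rfind s.toList ['|'] := by
      simpa using hne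
    obtain ⟨hf, hr, hrlen⟩ := walls_bounds s.toList hne'
    rw [PySem.List.foldl_append_singleton_eq_map, PySem.List.foldl_append_singleton_eq_map]
    apply congrArg
    apply List.map_congr_left
    intro i _
    rw [pref_fold s.toList [0] 0]
    simp only [zero_add]
    have hfA : PySem.Str.find s "|" = PySem.Chars.find s.toList ['|'] := by simp
    have hrA : PySem.Str.rfind s "|" = PySem.Chars.rfind s.toList ['|'] := by simp
    rw [hfA, hrA]
    set f := PySem.Chars.find s.toList ['|']
    set r := PySem.Chars.rfind s.toList ['|']
    have ha : 0 ≤ max (PySem.List.pyGetD starts i 0 - 1) f := le_trans hf (le_max_right _ _)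
    have hb : min (PySem.List.pyGetD ends i 0 - 1) r ≤ (s.toList.length : Int) := by
      have : r ≤ (s.toList.length : Int) := by omega
      exact le_trans (min_le_right _ _) this
    have := query_eq s.toList (max (PySem.List.pyGetD starts i 0 - 1) f)
      (min (PySem.List.pyGetD ends i 0 - 1) r) ha hb
    simpa [PySem.Str.pyGet?_eq] using this
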